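-- pv_equiv track=rewrite | github.com/gruenewald-lab/CGsmiles | cgsmiles/write_cgsmiles.py | _smiles_node_iter
-- ===== SOURCE A (Python) =====
-- def _smiles_node_iter(smiles_str):
--     organic_subset = 'B C N O P S F Cl Br I * b c n o s p'.split()
--     batom=False
--     for idx, node in enumerate(smiles_str):
--         if node == '[':
--             batom = True
--             start = idx
--
--         if node == ']' and batom:
--             stop = idx+1
--             batom = False
--             yield start, stop
--
--         if node in organic_subset and not batom:
--             yield idx, idx + 1
-- ===== SOURCE B (Python) =====
-- def _smiles_node_iter(smiles_str):
--     singles = set('BCNOPSFI*bcnosp')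
--     i = 0
--     n = len(smiles_str)
--     while i < n:
--         ch = smiles_str[i]
--         if ch == '[':
--             j = smiles_str.find(']', i)
--             if j == -1:
--                 break
--             yield i, j + 1
--             i = j + 1
--         elif ch in singles:
--             yield i, i + 1
--             i += 1
--         else:
--             i += 1
-- ===== Notes on version B (the rewrite author's own statement) =====
-- stated objective: faster
-- what changed: Replaced A's stateful char-by-char scan carrying an in-bracket boolean by an index-driven while loop that skips each bracket atom in one str.find(']') step and tests single organic characters against a set; Pre_ excludes strings with a second '[' before a bracket's closing ']' (not valid SMILES), where A starts the span at the last '[' and B at the first - a first-vs-last choice on a malformed token that neither behaviour specifies.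
-- outside the precondition, e.g. on _smiles_node_iter('[[C]'): A returns [(1, 4)], B returns [(0, 4)]
import Mathlib
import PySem

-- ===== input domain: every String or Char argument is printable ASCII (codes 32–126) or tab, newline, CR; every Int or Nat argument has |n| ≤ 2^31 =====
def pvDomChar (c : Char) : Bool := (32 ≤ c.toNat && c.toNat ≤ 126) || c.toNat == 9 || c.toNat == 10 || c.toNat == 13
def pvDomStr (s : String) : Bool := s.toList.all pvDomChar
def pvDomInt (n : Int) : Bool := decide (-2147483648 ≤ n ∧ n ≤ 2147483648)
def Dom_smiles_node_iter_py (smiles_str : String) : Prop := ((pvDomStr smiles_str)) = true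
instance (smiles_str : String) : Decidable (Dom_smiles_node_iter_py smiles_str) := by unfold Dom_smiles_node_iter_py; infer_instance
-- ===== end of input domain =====

-- B replaces A's stateful char-by-char boolean scan by an index-driven loop that skips each
-- bracket atom in one find-the-']' step (objective: faster by a constant factor, measured; equivalence is on Pre_, which
-- excludes malformed strings with a doubled '[' inside one bracket atom).

-- ===== PORT A =====
-- 'B C N O P S F Cl Br I * b c n o s p'.split()
def orgSubset : List String := ["B", "C", "N", "O", "P", "S", "F", "Cl", "Br", "I", "*", "b", "c", "n", "o", "s", "p"]

-- the for-loop of A as the obvious recursion over the remaining characters, carrying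
-- the loop state (batom, start); idx is the enumerate counter.  `start` begins at an
-- arbitrary 0: Python's `start` is unassigned until the first '[', and it is only read
-- after a '[' has set it.
def goA (idx : Nat) (batom : Bool) (start : Int) : List Char → List (Int × Int)
  | [] => []
  | c :: rest =>
    -- if node == '[': batom = True; start = idx
    let p : Bool × Int := if c = '[' then (true, (idx : Int)) else (batom, start)
    -- if node == ']' and batom: yield start, idx+1; batom = False
    let out1 : List (Int × Int) := if c = ']' ∧ p.1 = true then [(p.2, (idx : Int) + 1)] else []
    let b2 : Bool := if c = ']' ∧ p.1 = true then false else p.1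
    -- if node in organic_subset and not batom: yield idx, idx+1
    let out2 : List (Int × Int) :=
      if String.ofList [c] ∈ orgSubset ∧ b2 = false then [((idx : Int), (idx : Int) + 1)] else []
    out1 ++ out2 ++ goA (idx + 1) b2 p.2 rest

def smiles_node_iter_py (smiles_str : String) : List (Int × Int) :=
  goA 0 false 0 smiles_str.toList

-- ===== PORT B =====
-- set('BCNOPSFI*bcnosp')
def singlesB : List Char := ['B', 'C', 'N', 'O', 'P', 'S', 'F', 'I', '*', 'b', 'c', 'n', 'o', 's', 'p']

-- smiles_str.find(']', i) restricted to the tail after position i (s[i] = '[' is never ']');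
-- relative index of the first ']'
def findRB : List Char → Option Nat
  | [] => none
  | c :: rest => if c = ']' then some 0 else (findRB rest).map (· + 1)

-- the while loop of Source B: i is the absolute index, the list is the remaining characters
def goB (i : Nat) : List Char → List (Int × Int)
  | [] => []
  | c :: rest =>
    if c = '[' then
      match findRB rest with
      | none => []   -- j == -1: break
      | some k =>
        -- yield i, j + 1   (here j = i + 1 + k)
        ((i : Int), (i : Int) + k + 2) :: goB (i + k + 2) (rest.drop (k + 1))
    else if c ∈ singlesB then ((i : Int), (i : Int) + 1) :: goB (i + 1) rest
    else goB (i + 1) rest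
  termination_by cs => cs.length
  decreasing_by all_goals (simp [List.length_drop]; try omega)

def smiles_node_iter_py_alt (smiles_str : String) : List (Int × Int) :=
  goB 0 smiles_str.toList

-- ===== PRECONDITION & SPEC =====
-- no second '[' strictly between a '[' and the first ']' after it
def noNest (l : List Char) : Prop :=
  ∀ a b c : Fin l.length, (a : Nat) < b → (b : Nat) < c →
    l.get a = '[' → l.get b = '[' → l.get c = ']' →
    ∃ t : Fin l.length, (a : Nat) < t ∧ (t : Nat) < c ∧ l.get t = ']'

-- Pre_ excludes strings in which a second '[' occurs before a bracket's closing ']'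
-- (not a valid SMILES token): there A starts the span at the LAST '[' and B at the
-- FIRST — a first-vs-last choice on a malformed token that nothing specifies.
def Pre_smiles_node_iter_py (smiles_str : String) : Prop := noNest smiles_str.toList
instance (smiles_str : String) : Decidable (Pre_smiles_node_iter_py smiles_str) := by
  unfold Pre_smiles_node_iter_py; unfold noNest; infer_instance

def pvWitness_smiles_node_iter_py : String := "C[NH2]O"

def Spec_smiles_node_iter_py (smiles_str : String) (out : List (Int × Int)) : Prop := out = smiles_node_iter_py_alt smiles_str
instance (smiles_str : String) (out : List (Int × Int)) : Decidable (Spec_smiles_node_iter_py smiles_str out) := by unfold Spec_smiles_node_iter_py; infer_instance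

-- ===== CLAIM (what is proved, stated in full; the proofs are below) =====
def Claim_equal_smiles_node_iter_py : Prop := ∀ (smiles_str : String), Dom_smiles_node_iter_py smiles_str → Pre_smiles_node_iter_py smiles_str → Spec_smiles_node_iter_py smiles_str (smiles_node_iter_py smiles_str)

-- ===== LEMMAS AND PROOFS =====

-- A's one-char string membership in organic_subset is membership in B's single-char set
lemma mem_org_iff (c : Char) : (String.ofList [c] ∈ orgSubset) ↔ c ∈ singlesB := by
  simp [orgSubset, singlesB, String.ext_iff, String.toList_ofList]

-- one step of A's loop, per character class
lemma goA_cons_lb (j : Nat) (b : Bool) (st : Int) (rest : List Char) :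
    goA j b st ('[' :: rest) = goA (j + 1) true (j : Int) rest := by
  simp [goA, orgSubset, String.ext_iff]

lemma goA_cons_close_true (j : Nat) (st : Int) (rest : List Char) :
    goA j true st (']' :: rest) = (st, (j : Int) + 1) :: goA (j + 1) false st rest := by
  simp [goA, orgSubset, String.ext_iff]

lemma goA_cons_close_false (j : Nat) (st : Int) (rest : List Char) :
    goA j false st (']' :: rest) = goA (j + 1) false st rest := by
  simp [goA, orgSubset, String.ext_iff]

lemma goA_cons_other_true (j : Nat) (st : Int) {c : Char} (h1 : c ≠ '[') (h2 : c ≠ ']')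
    (rest : List Char) : goA j true st (c :: rest) = goA (j + 1) true st rest := by
  simp [goA, h1, h2]

lemma goA_cons_org_false (j : Nat) (st : Int) {c : Char} (h1 : c ≠ '[') (h2 : c ≠ ']')
    (hc : c ∈ singlesB) (rest : List Char) :
    goA j false st (c :: rest) = ((j : Int), (j : Int) + 1) :: goA (j + 1) false st rest := by
  simp [goA, h1, h2, (mem_org_iff c).mpr hc]

lemma goA_cons_nonorg_false (j : Nat) (st : Int) {c : Char} (h1 : c ≠ '[') (h2 : c ≠ ']')
    (hc : c ∉ singlesB) (rest : List Char) :
    goA j false st (c :: rest) = goA (j + 1) false st rest := by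
  simp [goA, h1, h2, mem_org_iff, hc]

-- proof-only helper: relative index of the last '[' in the scanned window
def lastLB : List Char → Option Nat
  | [] => none
  | c :: rest =>
    match lastLB rest with
    | some m => some (m + 1)
    | none => if c = '[' then some 0 else none

-- inside a bracket atom, A scans up to the first ']' (tracking the last '[' as start),
-- yields, and leaves bracket mode
lemma goA_true (cs : List Char) : ∀ (j : Nat) (st : Int),
    goA j true st cs =
      match findRB cs with
      | none => []
      | some k =>
        let st' : Int := match lastLB (cs.take k) with
          | some m => (j : Int) + m
          | none => st
        (st', (j : Int) + k + 1) :: goA (j + k + 1) false st' (cs.drop (k + 1)) := by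
  induction cs with
  | nil => intro j st; simp [goA, findRB]
  | cons c rest ih =>
    intro j st
    by_cases hc : c = ']'
    · subst hc
      rw [goA_cons_close_true]
      simp [findRB, lastLB]
    · have hf2 : findRB (c :: rest) = (findRB rest).map (· + 1) := by simp [findRB, hc]
      have hst : goA j true st (c :: rest) = goA (j + 1) true (if c = '[' then (j : Int) else st) rest := by
        by_cases hb : c = '['
        · subst hb; rw [goA_cons_lb]; simp
        · rw [goA_cons_other_true j st hb hc, if_neg hb]
      rw [hst, ih, hf2]
      cases hf : findRB rest with
      | none => rfl
      | some k =>
        simp only [Option.map_some, List.take_succ_cons, List.drop_succ_cons]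
        have e2 : lastLB (c :: rest.take k) =
            match lastLB (rest.take k) with
            | some m => some (m + 1)
            | none => if c = '[' then some 0 else none := rfl
        rw [e2]
        have hidx : j + 1 + k + 1 = j + (k + 1) + 1 := by omega
        cases hl : lastLB (rest.take k) with
        | some m =>
          simp only []
          rw [hidx]
          push_cast
          ring_nf
        | none =>
          by_cases hb : c = '['
          · simp only [hb, reduceIte]
            rw [hidx]
            push_cast
            ring_nf
          · simp only [hb, reduceIte]
            rw [hidx]
            push_cast
            ring_nf

-- one step of B's loop, per character class
lemma goB_cons_lb (j : Nat) (rest : List Char) :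
    goB j ('[' :: rest) =
      match findRB rest with
      | none => []
      | some k => ((j : Int), (j : Int) + k + 2) :: goB (j + k + 2) (rest.drop (k + 1)) := by
  rw [goB]; simp

lemma goB_cons_org (j : Nat) {c : Char} (h1 : c ≠ '[') (hmem : c ∈ singlesB) (rest : List Char) :
    goB j (c :: rest) = ((j : Int), (j : Int) + 1) :: goB (j + 1) rest := by
  rw [goB]; simp [h1, hmem]

lemma goB_cons_skip (j : Nat) {c : Char} (h1 : c ≠ '[') (hmem : c ∉ singlesB) (rest : List Char) :
    goB j (c :: rest) = goB (j + 1) rest := by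
  rw [goB]; simp [h1, hmem]

-- findRB finds the FIRST ']' (and nothing before it is ']')
lemma findRB_spec {l : List Char} {k : Nat} (h : findRB l = some k) :
    l[k]? = some ']' ∧ ∀ t, t < k → l[t]? ≠ some ']' := by
  induction l generalizing k with
  | nil => simp [findRB] at h
  | cons c rest ih =>
    by_cases hc : c = ']'
    · subst hc; simp [findRB] at h; subst h; simp
    · simp only [findRB, if_neg hc] at h
      cases hf : findRB rest with
      | none => rw [hf] at h; simp at h
      | some k' =>
        rw [hf] at h; simp at h; subst h
        obtain ⟨h1, h2⟩ := ih hf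
        refine ⟨by simpa using h1, ?_⟩
        intro t ht
        cases t with
        | zero => simpa using hc
        | succ t' => simpa using h2 t' (by omega)

-- lastLB really points at a '['
lemma lastLB_spec {l : List Char} {m : Nat} (h : lastLB l = some m) :
    l[m]? = some '[' := by
  induction l generalizing m with
  | nil => simp [lastLB] at h
  | cons c rest ih =>
    simp only [lastLB] at h
    cases hl : lastLB rest with
    | some m' =>
      rw [hl] at h; simp at h; subst h
      simpa using ih hl
    | none =>
      rw [hl] at h
      by_cases hc : c = '['
      · simp [hc] at h; subst h; simp [hc]
      · simp [hc] at h

-- noNest survives dropping the head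
lemma noNest_tail {x : Char} {l : List Char} (h : noNest (x :: l)) : noNest l := by
  intro a b c hab hbc ha hb hc
  have ha' : (x :: l).get ⟨a + 1, by simp⟩ = '[' := by simpa using ha
  have hb' : (x :: l).get ⟨b + 1, by simp⟩ = '[' := by simpa using hb
  have hc' : (x :: l).get ⟨c + 1, by simp⟩ = ']' := by simpa using hc
  obtain ⟨t, h1, h2, h3⟩ := h ⟨a + 1, by simp⟩
    ⟨b + 1, by simp⟩ ⟨c + 1, by simp⟩
    (by simpa using hab) (by simpa using hbc) ha' hb' hc'
  have htlt : (t : Nat) < l.length + 1 := by simpa using t.isLt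
  have h1' : (a : Nat) + 1 < (t : Nat) := by simpa using h1
  have h2' : (t : Nat) < (c : Nat) + 1 := by simpa using h2
  have hclt : (c : Nat) < l.length := c.isLt
  refine ⟨⟨(t : Nat) - 1, by omega⟩, by simp; omega, by simp; omega, ?_⟩
  have key : (x :: l).get ⟨((t : Nat) - 1) + 1, by simpa using Nat.succ_lt_succ (show (t : Nat) - 1 < l.length by omega)⟩ = ']' := by
    have heq : (⟨((t : Nat) - 1) + 1, by simpa using Nat.succ_lt_succ (show (t : Nat) - 1 < l.length by omega)⟩ : Fin (x :: l).length) = t := by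
      apply Fin.ext; simp; omega
    rw [heq]; exact h3
  simpa using key

lemma noNest_drop {l : List Char} (h : noNest l) (m : Nat) : noNest (l.drop m) := by
  induction m generalizing l with
  | zero => simpa using h
  | succ m' ih =>
    cases l with
    | nil => intro a; exact absurd a.isLt (by simp)
    | cons x rest => simpa using ih (noNest_tail h)

-- under noNest, the window before a bracket's closing ']' contains no further '['
lemma lastLB_none_of_noNest {rest : List Char} {k : Nat}
    (hN : noNest ('[' :: rest)) (hf : findRB rest = some k) :
    lastLB (rest.take k) = none := by
  obtain ⟨hcl, hfst⟩ := findRB_spec hf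
  have hk : k < rest.length := by
    by_contra hk
    rw [List.getElem?_eq_none (by omega)] at hcl
    simp at hcl
  cases hl : lastLB (rest.take k) with
  | none => rfl
  | some m =>
    exfalso
    have hm : m < k := by
      have := lastLB_spec hl
      by_contra hm
      rw [List.getElem?_eq_none (by simp; omega)] at this
      simp at this
    have hmo : rest[m]? = some '[' := by
      have := lastLB_spec hl
      rwa [List.getElem?_take_of_lt hm] at this
    -- instantiate noNest at 0 < m+1 < k+1
    have hget_b : ('[' :: rest).get ⟨m + 1, by simp; omega⟩ = '[' := by
      have : rest[m] = '[' := by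
        have := hmo; rwa [List.getElem?_eq_getElem (by omega), Option.some_inj] at this
      simpa [List.get] using this
    have hget_c : ('[' :: rest).get ⟨k + 1, by simp; omega⟩ = ']' := by
      have : rest[k] = ']' := by
        have := hcl; rwa [List.getElem?_eq_getElem (by omega), Option.some_inj] at this
      simpa [List.get] using this
    obtain ⟨t, h1, h2, h3⟩ := hN ⟨0, by simp⟩ ⟨m + 1, by simp; omega⟩ ⟨k + 1, by simp; omega⟩
      (by simp) (by simp; omega) (by simp) hget_b hget_c
    have ht1 : 1 ≤ (t : Nat) := by simpa using h1
    have ht2 : (t : Nat) - 1 < k := by simp at h2; omega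
    have htl : (t : Nat) < rest.length + 1 := by simpa using t.isLt
    have hval : rest[(t : Nat) - 1]? = some ']' := by
      have hg : ('[' :: rest).get t = ']' := h3
      have hgv : rest[(t : Nat) - 1] = ']' := by
        rcases t with ⟨tv, htv⟩
        cases tv with
        | zero => simp at ht1
        | succ tv' => simpa using hg
      rw [List.getElem?_eq_getElem (by omega)]
      simpa using hgv
    exact hfst _ ht2 hval

-- outside bracket mode A and B walk in lockstep (A's stale `start` value is irrelevant)
lemma goA_eq_goB : ∀ (cs : List Char) (j : Nat) (s0 : Int), noNest cs → goA j false s0 cs = goB j cs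
  | [], j, s0, _ => by simp [goA, goB]
  | c :: rest, j, s0, hN => by
    by_cases hb : c = '['
    · subst hb
      rw [goA_cons_lb, goA_true, goB_cons_lb]
      cases hf : findRB rest with
      | none => rfl
      | some k =>
        simp only []
        rw [lastLB_none_of_noNest hN hf]
        simp only []
        have hidx : j + 1 + k + 1 = j + k + 2 := by omega
        rw [hidx, goA_eq_goB (rest.drop (k + 1)) (j + k + 2) _ (noNest_drop (noNest_tail hN) (k + 1))]
        push_cast
        ring_nf
    · by_cases hc : c = ']'
      · subst hc
        rw [goA_cons_close_false, goA_eq_goB rest (j + 1) s0 (noNest_tail hN),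
          goB_cons_skip j (by decide) (by decide) rest]
      · by_cases hmem : c ∈ singlesB
        · rw [goA_cons_org_false j s0 hb hc hmem, goA_eq_goB rest (j + 1) s0 (noNest_tail hN),
            goB_cons_org j hb hmem rest]
        · rw [goA_cons_nonorg_false j s0 hb hc hmem, goA_eq_goB rest (j + 1) s0 (noNest_tail hN),
            goB_cons_skip j hb hmem rest]
  termination_by cs => cs.length
  decreasing_by all_goals (simp [List.length_drop]; try omega)

-- ===== VERDICT (by name: the statement is the Claim_ definition above) =====
theorem smiles_node_iter_py_spec : Claim_equal_smiles_node_iter_py := by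
  intro s _ hpre
  unfold Spec_smiles_node_iter_py smiles_node_iter_py smiles_node_iter_py_alt
  exact goA_eq_goB s.toList 0 0 hpre
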